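-- pv_equiv track=rewrite | github.com/finndohl-spezifikation/PCRP-Bot | channel_format.py | _ascii_to_italic
-- ===== SOURCE A (Python) =====
-- _IL = 0x1D622   # kursiv-klein a
--
-- _IU = 0x1D608   # kursiv-groß  A
--
-- def _ascii_to_italic(name: str) -> str:
--     """ASCII → kursiv Unicode. Erster Buchstabe + nach '-' immer GROß."""
--     out = []
--     cap = True
--     for ch in name:
--         if ch == '-':
--             out.append('-')
--             cap = True
--         elif 'a' <= ch <= 'z':
--             out.append(chr((_IU if cap else _IL) + ord(ch) - ord('a')))
--             cap = False
--         elif 'A' <= ch <= 'Z':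
--             out.append(chr(_IU + ord(ch) - ord('A')))
--             cap = False
--         else:
--             out.append(ch)
--             cap = False
--     return ''.join(out)
-- ===== SOURCE B (Python) =====
-- _IL = 0x1D622   # kursiv-klein a
--
-- _IU = 0x1D608   # kursiv-groß  A
--
-- def _tr(ch, cap):
--     if 'a' <= ch <= 'z':
--         return chr((_IU if cap else _IL) + ord(ch) - ord('a'))
--     if 'A' <= ch <= 'Z':
--         return chr(_IU + ord(ch) - ord('A'))
--     return ch
--
-- def _ascii_to_italic(name: str) -> str:
--     """ASCII → kursiv Unicode. Erster Buchstabe + nach '-' immer GROß."""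
--     return '-'.join(
--         ''.join(_tr(ch, i == 0) for i, ch in enumerate(seg))
--         for seg in name.split('-'))
-- ===== Notes on version B (the rewrite author's own statement) =====
-- stated objective: simpler
-- what changed: Replaces A's single loop threading a mutable cap flag with a split-on-'-' / transform-each-segment / join decomposition where only each segment's first character is capitalized.
import Mathlib
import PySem

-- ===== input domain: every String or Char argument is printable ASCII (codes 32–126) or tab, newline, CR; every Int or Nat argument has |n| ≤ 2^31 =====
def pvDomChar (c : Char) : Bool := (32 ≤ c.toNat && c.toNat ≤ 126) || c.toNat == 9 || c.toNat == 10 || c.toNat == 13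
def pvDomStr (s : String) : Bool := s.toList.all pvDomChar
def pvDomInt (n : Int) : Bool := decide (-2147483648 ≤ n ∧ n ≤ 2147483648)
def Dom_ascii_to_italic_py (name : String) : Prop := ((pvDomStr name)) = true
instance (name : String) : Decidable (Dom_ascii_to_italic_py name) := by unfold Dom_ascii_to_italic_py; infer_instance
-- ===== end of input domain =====

-- B replaces A's threaded mutable cap flag by splitting on '-' and capitalizing only
-- each segment's first character (objective: simpler decomposition; same cost).

-- ===== PORT A =====
-- literal transliteration of A's loop: accumulator out, flag cap, threaded by foldl
def ascii_to_italic_py (name : String) : String :=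
  String.mk (name.toList.foldl (fun (st : List Char × Bool) ch =>
    if ch = '-' then (st.1 ++ ['-'], true)
    else if 'a' ≤ ch ∧ ch ≤ 'z' then
      (st.1 ++ [Char.ofNat ((if st.2 then 0x1D608 else 0x1D622) + ch.toNat - 'a'.toNat)], false)
    else if 'A' ≤ ch ∧ ch ≤ 'Z' then
      (st.1 ++ [Char.ofNat (0x1D608 + ch.toNat - 'A'.toNat)], false)
    else (st.1 ++ [ch], false)) ([], true)).1

-- ===== PORT B =====
-- Source B's _tr(ch, cap)
def pvTr (ch : Char) (cap : Bool) : Char :=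
  if 'a' ≤ ch ∧ ch ≤ 'z' then
    Char.ofNat ((if cap then 0x1D608 else 0x1D622) + ch.toNat - 'a'.toNat)
  else if 'A' ≤ ch ∧ ch ≤ 'Z' then
    Char.ofNat (0x1D608 + ch.toNat - 'A'.toNat)
  else ch

-- ''.join(_tr(ch, i == 0) for i, ch in enumerate(seg))
def pvSeg (seg : List Char) : List Char :=
  (PySem.List.enumerate seg).map (fun p => pvTr p.2 (p.1 == 0))

-- name.split('-') ported as List.splitOn '-', '-'.join as PySem.Chars.join
def ascii_to_italic_py_alt (name : String) : String :=
  String.mk (PySem.Chars.join ['-'] ((name.toList.splitOn '-').map pvSeg))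

-- ===== PRECONDITION & SPEC =====
def Spec_ascii_to_italic_py (name : String) (out : String) : Prop := out = ascii_to_italic_py_alt name
instance (name : String) (out : String) : Decidable (Spec_ascii_to_italic_py name out) := by unfold Spec_ascii_to_italic_py; infer_instance

-- ===== CLAIM (what is proved, stated in full; the proofs are below) =====
def Claim_equal_ascii_to_italic_py : Prop := ∀ (name : String), Dom_ascii_to_italic_py name → Spec_ascii_to_italic_py name (ascii_to_italic_py name)

-- ===== LEMMAS AND PROOFS =====

-- the per-step function of A's fold
def pvStepA (st : List Char × Bool) (ch : Char) : List Char × Bool :=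
  if ch = '-' then (st.1 ++ ['-'], true)
  else if 'a' ≤ ch ∧ ch ≤ 'z' then
    (st.1 ++ [Char.ofNat ((if st.2 then 0x1D608 else 0x1D622) + ch.toNat - 'a'.toNat)], false)
  else if 'A' ≤ ch ∧ ch ≤ 'Z' then
    (st.1 ++ [Char.ofNat (0x1D608 + ch.toNat - 'A'.toNat)], false)
  else (st.1 ++ [ch], false)

-- A's output characters, recursively
def pvCore : List Char → Bool → List Char
  | [], _ => []
  | c :: cs, cap =>
    if c = '-' then '-' :: pvCore cs true else pvTr c cap :: pvCore cs false

theorem pvStepA_fst (st : List Char × Bool) (ch : Char) :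
    (pvStepA st ch).1 = st.1 ++ (pvCore [ch] st.2) := by
  rcases st with ⟨acc, cap⟩
  by_cases h : ch = '-' <;> simp [pvStepA, pvCore, pvTr, h] <;> split_ifs <;> simp

theorem pvStepA_snd (st : List Char × Bool) (ch : Char) :
    (pvStepA st ch).2 = (ch = '-') := by
  rcases st with ⟨acc, cap⟩
  by_cases h : ch = '-' <;> simp [pvStepA, h] <;> split_ifs <;> simp [h]

theorem pvFoldA (l : List Char) (acc : List Char) (cap : Bool) :
    (l.foldl pvStepA (acc, cap)).1 = acc ++ pvCore l cap := by
  induction l generalizing acc cap with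
  | nil => simp [pvCore]
  | cons c cs ih =>
    have h1 := pvStepA_fst (acc, cap) c
    have h2 := pvStepA_snd (acc, cap) c
    rcases hs : pvStepA (acc, cap) c with ⟨acc', cap'⟩
    rw [hs] at h1 h2
    simp only [List.foldl_cons, hs, ih]
    by_cases h : c = '-' <;> simp_all [pvCore]

theorem pvSeg_nil : pvSeg [] = [] := by simp [pvSeg, PySem.List.enumerate_nil]

theorem pvSeg_tail (cs : List Char) (k : Int) (hk : 0 < k) :
    (PySem.List.enumerate cs k).map (fun p => pvTr p.2 (p.1 == 0)) =
      cs.map (fun c => pvTr c false) := by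
  induction cs generalizing k with
  | nil => simp [PySem.List.enumerate_nil]
  | cons c cs ih =>
    rw [PySem.List.enumerate_cons]
    simp only [List.map_cons]
    rw [ih (k + 1) (by omega)]
    have : (k == 0) = false := by simp; omega
    simp [this]

theorem pvSeg_cons (c : Char) (cs : List Char) :
    pvSeg (c :: cs) = pvTr c true :: cs.map (fun x => pvTr x false) := by
  simp only [pvSeg, PySem.List.enumerate_cons, List.map_cons]
  rw [pvSeg_tail cs (0 + 1) (by omega)]
  simp

-- the '-'-separated tail part of B's join
def pvRestJoin (parts : List (List Char)) : List Char :=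
  parts.flatMap (fun s => '-' :: pvSeg s)

theorem pvJoin_eq (s0 : List Char) (rest : List (List Char)) :
    PySem.Chars.join ['-'] ((s0 :: rest).map pvSeg) = pvSeg s0 ++ pvRestJoin rest := by
  induction rest generalizing s0 with
  | nil => simp [PySem.Chars.join, List.intercalate, pvRestJoin]
  | cons t ts ih =>
    have h := ih t
    simp only [PySem.Chars.join, List.intercalate, List.map_cons,
      List.intersperse_cons₂, List.flatten_cons] at h ⊢
    rw [h]
    simp [pvRestJoin]

theorem pvCore_split (l : List Char) :
    pvCore l true = pvSeg ((l.splitOn '-').headI) ++ pvRestJoin ((l.splitOn '-').tail) ∧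
    pvCore l false = ((l.splitOn '-').headI).map (fun c => pvTr c false) ++
      pvRestJoin ((l.splitOn '-').tail) := by
  induction l with
  | nil => simp [pvCore, List.splitOn, List.splitOnP_nil, pvSeg_nil, pvRestJoin]
  | cons c cs ih =>
    obtain ⟨s0, rest, hsr⟩ := List.exists_cons_of_ne_nil (List.splitOnP_ne_nil (· == '-') cs)
    by_cases h : c = '-'
    · subst h
      have hsp : (('-' :: cs).splitOn '-') = [] :: cs.splitOn '-' := by
        simp [List.splitOn, List.splitOnP_cons]
      rw [hsp]
      simp only [List.headI, List.tail, pvSeg_nil, List.map_nil, List.nil_append]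
      have : pvRestJoin (cs.splitOn '-') = '-' :: pvCore cs true := by
        simp only [List.splitOn] at *
        rw [hsr]
        have h1 := ih.1
        rw [hsr] at h1
        simp only [List.headI, List.tail] at h1
        simp [pvRestJoin, h1]
      constructor <;> simp [pvCore, this]
    · have hsp : ((c :: cs).splitOn '-') = (c :: s0) :: rest := by
        simp only [List.splitOn] at *
        rw [List.splitOnP_cons, hsr]
        simp [h]
      rw [hsp]
      have h2 := ih.2
      simp only [List.splitOn] at h2
      rw [hsr] at h2
      simp only [List.headI, List.tail] at h2 ⊢
      constructor
      · simp [pvCore, h, pvSeg_cons, h2]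
      · simp [pvCore, h, h2]

theorem pvMain (l : List Char) :
    (l.foldl pvStepA ([], true)).1 =
      PySem.Chars.join ['-'] ((l.splitOn '-').map pvSeg) := by
  obtain ⟨s0, rest, hsr⟩ := List.exists_cons_of_ne_nil (List.splitOnP_ne_nil (· == '-') l)
  have hsr' : l.splitOn '-' = s0 :: rest := hsr
  rw [pvFoldA l [] true, hsr', pvJoin_eq]
  have h := (pvCore_split l).1
  rw [hsr'] at h
  simpa using h

-- ===== VERDICT (by name: the statement is the Claim_ definition above) =====
theorem ascii_to_italic_py_spec : Claim_equal_ascii_to_italic_py := by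
  intro name _
  unfold Spec_ascii_to_italic_py ascii_to_italic_py ascii_to_italic_py_alt
  rw [show (fun (st : List Char × Bool) ch =>
    if ch = '-' then (st.1 ++ ['-'], true)
    else if 'a' ≤ ch ∧ ch ≤ 'z' then
      (st.1 ++ [Char.ofNat ((if st.2 then 0x1D608 else 0x1D622) + ch.toNat - 'a'.toNat)], false)
    else if 'A' ≤ ch ∧ ch ≤ 'Z' then
      (st.1 ++ [Char.ofNat (0x1D608 + ch.toNat - 'A'.toNat)], false)
    else (st.1 ++ [ch], false)) = pvStepA from rfl]
  rw [pvMain]
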